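-- pv_equiv track=rewrite | github.com/Boniface316/bigdata_vqa | src/bigdatavqa/gmm/quantumutils/_quantumutils.py | Z_i
-- ===== SOURCE A (Python) =====
-- def Z_i(i, length):
--     """
--     if index i is in the range 0, ..., length-1, the function returns the operator Z_i
--     else: the funtion returns the pauli string consisting of pauli I's only
--     length is the number of pauli operators tensorised
--     """
--     pauli_string = ""
--     for j in range(length):
--         if i == j:
--             pauli_string += "Z"
--         else:
--             pauli_string += "I"
--     return pauli_string
-- ===== SOURCE B (Python) =====
-- def Z_i(i, length):
--     """Closed-form build: place Z directly at position i, all-I otherwise."""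
--     if 0 <= i < length:
--         return "I" * i + "Z" + "I" * (length - i - 1)
--     return "I" * length
-- ===== Notes on version B (the rewrite author's own statement) =====
-- stated objective: simpler
-- what changed: Replaced the per-index loop that branches on i == j with a closed-form construction: 'I'*i + 'Z' + 'I'*(length-i-1) when 0 <= i < length, else 'I'*length.
import Mathlib
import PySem

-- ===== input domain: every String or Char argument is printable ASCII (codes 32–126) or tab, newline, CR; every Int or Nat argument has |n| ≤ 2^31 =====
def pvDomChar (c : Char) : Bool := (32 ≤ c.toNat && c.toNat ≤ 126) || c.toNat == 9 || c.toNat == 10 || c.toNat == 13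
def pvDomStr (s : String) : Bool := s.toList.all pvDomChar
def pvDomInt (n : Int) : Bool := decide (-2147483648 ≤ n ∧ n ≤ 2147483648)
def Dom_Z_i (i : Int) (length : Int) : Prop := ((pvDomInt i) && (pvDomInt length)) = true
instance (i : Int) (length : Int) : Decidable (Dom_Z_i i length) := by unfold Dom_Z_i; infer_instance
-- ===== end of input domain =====

-- B replaces A's per-index scan-and-branch loop with a closed-form build: "I"*i + "Z" + "I"*(length-i-1) when i is in range, else "I"*length (objective: simpler).

-- ===== PORT A =====
-- loop 'for j in range(length): pauli_string += "Z" if i == j else "I"', on the char-list side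
def Z_i (i : Int) (length : Int) : String :=
  String.ofList ((PySem.List.pyRange 0 length 1).foldl
    (fun s j => s ++ (if i == j then ['Z'] else ['I'])) [])

-- ===== PORT B =====
def Z_i_alt (i : Int) (length : Int) : String :=
  if 0 ≤ i ∧ i < length then
    String.ofList (List.replicate i.toNat 'I' ++ 'Z' :: List.replicate (length - i - 1).toNat 'I')
  else
    String.ofList (List.replicate length.toNat 'I')

-- ===== PRECONDITION & SPEC =====
def Spec_Z_i (i : Int) (length : Int) (out : String) : Prop := out = Z_i_alt i length
instance (i : Int) (length : Int) (out : String) : Decidable (Spec_Z_i i length out) := by unfold Spec_Z_i; infer_instance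

-- ===== CLAIM (what is proved, stated in full; the proofs are below) =====
def Claim_equal_Z_i : Prop := ∀ (i : Int) (length : Int), Dom_Z_i i length → Spec_Z_i i length (Z_i i length)

-- ===== LEMMAS AND PROOFS =====

-- in-range case of the closed form, on Nat indices
lemma range_map_Z (n m : Nat) (hm : m < n) :
    (List.range n).map (fun k => if m = k then 'Z' else 'I')
      = List.replicate m 'I' ++ 'Z' :: List.replicate (n - m - 1) 'I' := by
  apply List.ext_getElem
  · simp; omega
  · intro k h1 h2
    simp only [List.getElem_map, List.getElem_range]
    rcases lt_trichotomy k m with h | h | h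
    · rw [List.getElem_append_left (by simpa using h)]
      simp [Nat.ne_of_gt h]
    · subst h
      rw [List.getElem_append_right (by simp)]
      simp
    · rw [List.getElem_append_right (by simpa using Nat.le_of_lt h)]
      have : k - m ≠ 0 := by omega
      rcases Nat.exists_eq_succ_of_ne_zero this with ⟨t, ht⟩
      simp [List.length_replicate, ht, Nat.ne_of_lt h]

lemma range_map_I (n : Nat) (i : Int) (hi : ∀ k : Nat, k < n → i ≠ (k : Int)) :
    (List.range n).map (fun k : Nat => if i == (0 + (k : Int)) then 'Z' else 'I')
      = List.replicate n 'I' := by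
  rw [List.eq_replicate_iff]
  constructor
  · simp
  · intro c hc
    simp only [List.mem_map, List.mem_range] at hc
    obtain ⟨k, hk, hck⟩ := hc
    rw [if_neg (by simpa using hi k hk)] at hck
    exact hck.symm

-- ===== VERDICT (by name: the statement is the Claim_ definition above) =====
theorem Z_i_spec : Claim_equal_Z_i := by
  intro i length _
  unfold Spec_Z_i Z_i Z_i_alt
  have hstep : (fun (s : List Char) (j : Int) => s ++ if i == j then ['Z'] else ['I'])
      = (fun (s : List Char) (j : Int) => s ++ [if i == j then 'Z' else 'I']) := by
    funext s j; split <;> rfl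
  rw [hstep, PySem.List.foldl_append_singleton_eq_map (fun j => if i == j then 'Z' else 'I')]
  rw [PySem.List.pyRange_one, List.map_map]
  simp only [List.nil_append, Function.comp_def]
  by_cases h : 0 ≤ i ∧ i < length
  · rw [if_pos h]
    have hm : i.toNat < (length - 0).toNat := by omega
    have heq : (fun k : Nat => if i == (0 + (k : Int)) then 'Z' else 'I')
        = (fun k : Nat => if i.toNat = k then 'Z' else 'I') := by
      funext k
      by_cases hk : i = (k : Int)
      · simp [hk]
      · have hk' : i.toNat ≠ k := by omega
        simp [hk, hk']
    rw [heq, range_map_Z _ _ hm]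
    have h1 : (length - 0).toNat - i.toNat - 1 = (length - i - 1).toNat := by omega
    rw [h1]
  · rw [if_neg h]
    rw [range_map_I ((length - 0).toNat) i
      (by intro k hk; rcases not_and_or.mp h with h' | h' <;> omega)]
    have h2 : (length - 0).toNat = length.toNat := by omega
    rw [h2]
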